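-- pv_equiv track=rewrite | github.com/adeelyaa/minnekhuzina-adelya-11-204 | calc_tfidf.py | build_lemma_document_frequency
-- ===== SOURCE A (Python) =====
-- from collections import Counter
--
-- def build_lemma_document_frequency(
--     doc_counters: dict[str, Counter[str]], lemma_map: dict[str, list[str]]
-- ) -> dict[str, int]:
--     df: dict[str, int] = {lemma: 0 for lemma in lemma_map}
--     for counter in doc_counters.values():
--         present = set(counter)
--         for lemma, terms in lemma_map.items():
--             if any(term in present for term in terms):
--                 df[lemma] += 1
--     return df
-- ===== SOURCE B (Python) =====
-- def build_lemma_document_frequency(doc_counters, lemma_map):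
--     # Inverted index: term -> list of lemmas whose variant list contains the term.
--     index = {}
--     for lemma, terms in lemma_map.items():
--         for term in terms:
--             index.setdefault(term, []).append(lemma)
--     df = dict.fromkeys(lemma_map, 0)
--     for counter in doc_counters.values():
--         matched = set()
--         for term in counter:
--             matched.update(index.get(term, ()))
--         for lemma in matched:
--             df[lemma] += 1
--     return df
-- ===== Notes on version B (the rewrite author's own statement) =====
-- stated objective: faster
-- what changed: B builds an inverted term->lemmas index once (setdefault/append), then for each document collects the matched lemmas by looking up only the terms present in that document and increments those, instead of A's rescan of every lemma's whole term list for every document.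
import Mathlib
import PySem

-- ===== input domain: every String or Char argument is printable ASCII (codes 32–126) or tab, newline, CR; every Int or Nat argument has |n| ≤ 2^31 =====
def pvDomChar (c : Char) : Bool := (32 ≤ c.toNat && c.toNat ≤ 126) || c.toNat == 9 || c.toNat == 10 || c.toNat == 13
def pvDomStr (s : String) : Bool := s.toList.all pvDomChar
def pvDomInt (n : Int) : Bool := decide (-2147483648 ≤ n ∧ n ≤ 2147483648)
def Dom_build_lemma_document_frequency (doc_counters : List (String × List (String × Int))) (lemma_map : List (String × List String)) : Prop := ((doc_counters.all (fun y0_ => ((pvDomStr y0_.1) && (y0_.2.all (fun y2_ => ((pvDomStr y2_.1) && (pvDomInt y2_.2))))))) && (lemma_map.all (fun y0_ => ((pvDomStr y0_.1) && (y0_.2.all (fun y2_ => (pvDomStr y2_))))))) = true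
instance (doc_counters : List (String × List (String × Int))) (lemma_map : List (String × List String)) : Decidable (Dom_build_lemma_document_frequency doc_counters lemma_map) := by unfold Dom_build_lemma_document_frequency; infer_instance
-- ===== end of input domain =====

-- B replaces A's scan of the whole lemma_map per document by an inverted term→lemmas index
-- built once; each document then only looks up its own present terms (alternative algorithm).

-- ===== PORT A =====
def build_lemma_document_frequency (doc_counters : List (String × List (String × Int))) (lemma_map : List (String × List String)) : List (String × Int) :=
  let dcD := PySem.Dict.ofList doc_counters
  let lmD := PySem.Dict.ofList lemma_map
  -- df = {lemma: 0 for lemma in lemma_map}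
  let df0 := lmD.keys.foldl (fun d l => d.insert l (0 : Int)) PySem.Dict.empty
  -- for counter in doc_counters.values(): present = set(counter); for lemma, terms in lemma_map.items(): if any(...): df[lemma] += 1
  let df := dcD.values.foldl (fun d c =>
    let present : PySem.Set String := PySem.Set.ofList (PySem.Dict.ofList c).keys
    lmD.items.foldl (fun d p =>
      if p.2.any (fun t => PySem.Set.contains present t) then d.modify p.1 0 (· + 1) else d) d) df0
  df.items

-- ===== PORT B =====
def build_lemma_document_frequency_alt (doc_counters : List (String × List (String × Int))) (lemma_map : List (String × List String)) : List (String × Int) :=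
  let lmD := PySem.Dict.ofList lemma_map
  -- index = {}; for lemma, terms in lemma_map.items(): for term in terms: index.setdefault(term, []).append(lemma)
  let index : PySem.Dict String (List String) :=
    lmD.items.foldl (fun ix p =>
      p.2.foldl (fun ix t => ix.modify t ([] : List String) (· ++ [p.1])) ix) PySem.Dict.empty
  -- df = dict.fromkeys(lemma_map, 0)
  let df0 := lmD.keys.foldl (fun d l => d.insert l (0 : Int)) PySem.Dict.empty
  -- for counter in doc_counters.values(): matched = set(); for term in counter: matched.update(index.get(term, ())); for lemma in matched: df[lemma] += 1
  let df := (PySem.Dict.ofList doc_counters).values.foldl (fun d c =>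
    let matched : PySem.Set String :=
      (PySem.Dict.ofList c).keys.foldl (fun m t => PySem.Set.update m (index.getD t [])) PySem.Set.empty
    matched.foldl (fun d l => d.modify l 0 (· + 1)) d) df0
  df.items

-- ===== PRECONDITION & SPEC =====
def Spec_build_lemma_document_frequency (doc_counters : List (String × List (String × Int))) (lemma_map : List (String × List String)) (out : List (String × Int)) : Prop := out = build_lemma_document_frequency_alt doc_counters lemma_map
instance (doc_counters : List (String × List (String × Int))) (lemma_map : List (String × List String)) (out : List (String × Int)) : Decidable (Spec_build_lemma_document_frequency doc_counters lemma_map out) := by unfold Spec_build_lemma_document_frequency; infer_instance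

-- ===== CLAIM (what is proved, stated in full; the proofs are below) =====
def Claim_equal_build_lemma_document_frequency : Prop := ∀ (doc_counters : List (String × List (String × Int))) (lemma_map : List (String × List String)), Dom_build_lemma_document_frequency doc_counters lemma_map → Spec_build_lemma_document_frequency doc_counters lemma_map (build_lemma_document_frequency doc_counters lemma_map)

-- ===== LEMMAS AND PROOFS =====

-- getD of a fold that inserts 0 at every key stays 0 everywhere.
theorem getD_foldl_insert_zero (l : List String) (d : PySem.Dict String Int)
    (h : ∀ k, d.getD k 0 = 0) (k : String) :
    (l.foldl (fun d x => d.insert x (0 : Int)) d).getD k 0 = 0 := by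
  induction l generalizing d with
  | nil => exact h k
  | cons x xs ih =>
      simp only [List.foldl_cons]
      exact ih _ (fun k' => by rw [PySem.Dict.getD_insert]; split <;> simp [h])

-- a Set.update-of-already-present-elements is a no-op
theorem set_update_eq_self (s xs : List String) (h : ∀ x ∈ xs, x ∈ s) :
    PySem.Set.update s xs = s := by
  rw [PySem.Set.update_eq_append_filter]
  have : ((PySem.Set.ofList xs).filter (fun y => !(PySem.Set.contains s y))) = [] := by
    rw [List.filter_eq_nil_iff]
    intro x hx
    have := h x ((PySem.Set.mem_ofList _ _).mp hx)
    simpa using this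
  rw [this, List.append_nil]

-- two items of an assoc list with Nodup keys and equal keys coincide
theorem fst_inj_of_nodup {α β : Type} (L : List (α × β)) (h : (L.map Prod.fst).Nodup)
    {p q : α × β} (hp : p ∈ L) (hq : q ∈ L) (he : p.1 = q.1) : p = q := by
  induction L with
  | nil => cases hp
  | cons a L ih =>
      simp only [List.map_cons, List.nodup_cons] at h
      rcases List.mem_cons.mp hp with rfl | hp'
      · rcases List.mem_cons.mp hq with rfl | hq'
        · rfl
        · exact absurd (he ▸ List.mem_map_of_mem hq') h.1
      · rcases List.mem_cons.mp hq with rfl | hq'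
        · exact absurd (he ▸ List.mem_map_of_mem hp') h.1
        · exact ih h.2 hp' hq'

-- counting an element's key in the filtered items of a dict with Nodup keys
theorem count_map_fst_filter (L : List (String × List String)) (q : String × List String → Bool)
    (p : String × List String) (hmem : p ∈ L) (hnd : (L.map Prod.fst).Nodup) :
    ((L.filter q).map Prod.fst).count p.1 = if q p then 1 else 0 := by
  induction L with
  | nil => cases hmem
  | cons a L ih =>
      simp only [List.map_cons, List.nodup_cons] at hnd
      rcases List.mem_cons.mp hmem with h | h
      · subst h
        have hno : p.1 ∉ (L.filter q).map Prod.fst := fun hc => by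
          rcases List.mem_map.mp hc with ⟨r, hr, he⟩
          exact hnd.1 (he ▸ List.mem_map_of_mem (List.mem_of_mem_filter hr))
        by_cases hq : q p = true
        · simp [hq, List.count_eq_zero.mpr hno]
        · simp [hq, List.count_eq_zero.mpr hno]
      · have hne : a.1 ≠ p.1 := fun he => hnd.1 (he ▸ List.mem_map_of_mem h)
        rw [List.filter_cons]
        split
        · rw [List.map_cons, List.count_cons]
          simp [hne, ih h hnd.2]
        · exact ih h hnd.2

-- one document step of A, seen through getD at a fixed key p.1 of lemma_map's items
theorem getD_inner_step (L : List (String × List String)) (q : String × List String → Bool)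
    (d : PySem.Dict String Int) (p : String × List String) (hmem : p ∈ L)
    (hnd : (L.map Prod.fst).Nodup) :
    (L.foldl (fun d r => if q r then d.modify r.1 0 (· + 1) else d) d).getD p.1 0
      = d.getD p.1 0 + (if q p then 1 else 0) := by
  rw [PySem.List.foldl_if_eq_foldl_filter]
  have h1 : (L.filter q).foldl (fun d r => d.modify r.1 0 (· + 1)) d
      = ((L.filter q).map Prod.fst).foldl (fun d x => d.modify x 0 (· + 1)) d := by
    rw [List.foldl_map]
  rw [h1, PySem.Dict.getD_foldl_modify_add_one, count_map_fst_filter L q p hmem hnd]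
  split <;> simp

-- A's whole document loop, through getD at a fixed key of lemma_map's items
theorem getD_doc_loop (docs : List (List (String × Int))) (L : List (String × List String))
    (d : PySem.Dict String Int) (p : String × List String) (hmem : p ∈ L)
    (hnd : (L.map Prod.fst).Nodup) :
    (docs.foldl (fun d c =>
        L.foldl (fun d r =>
          if r.2.any (fun t => PySem.Set.contains (PySem.Set.ofList (PySem.Dict.ofList c).keys) t)
          then d.modify r.1 0 (· + 1) else d) d) d).getD p.1 0
      = d.getD p.1 0 +
        (docs.countP (fun c =>
          p.2.any (fun t => PySem.Set.contains (PySem.Set.ofList (PySem.Dict.ofList c).keys) t)) : Int) := by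
  induction docs generalizing d with
  | nil => simp
  | cons c docs ih =>
      simp only [List.foldl_cons, List.countP_cons]
      rw [ih _, getD_inner_step L _ d p hmem hnd]
      split <;> push_cast <;> ring

-- A's loops do not change the key list when every modified key is already present.
theorem keys_inner_step (L : List (String × List String)) (q : String × List String → Bool)
    (d : PySem.Dict String Int) (hsub : ∀ r ∈ L, r.1 ∈ d.keys) :
    (L.foldl (fun d r => if q r then d.modify r.1 0 (· + 1) else d) d).keys = d.keys := by
  rw [PySem.List.foldl_if_eq_foldl_filter]
  have h1 : (L.filter q).foldl (fun d r => d.modify r.1 0 (· + 1)) d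
      = (L.filter q).foldl (fun d r => d.modify ((fun (r : String × List String) => r.1) r) 0 ((fun (_ : String × List String) => (· + 1)) r)) d := rfl
  rw [h1, PySem.Dict.keys_foldl_modify_key]
  exact set_update_eq_self _ _ (by
    intro x hx
    rcases List.mem_map.mp hx with ⟨r, hr, he⟩
    exact he ▸ hsub r (List.mem_of_mem_filter hr))

theorem keys_doc_loop (docs : List (List (String × Int))) (L : List (String × List String))
    (d : PySem.Dict String Int) (hsub : ∀ r ∈ L, r.1 ∈ d.keys) :
    (docs.foldl (fun d c =>
        L.foldl (fun d r =>
          if r.2.any (fun t => PySem.Set.contains (PySem.Set.ofList (PySem.Dict.ofList c).keys) t)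
          then d.modify r.1 0 (· + 1) else d) d) d).keys = d.keys := by
  induction docs generalizing d with
  | nil => rfl
  | cons c docs ih =>
      simp only [List.foldl_cons]
      rw [ih, keys_inner_step L _ d hsub]
      intro r hr; rw [keys_inner_step L _ d hsub]; exact hsub r hr

-- df0 = fold inserting 0 over the (Nodup) key list: its keys are exactly that list
theorem keys_df0 (K : List String) (hnd : K.Nodup) :
    (K.foldl (fun d l => d.insert l (0 : Int)) PySem.Dict.empty).keys = K := by
  rw [PySem.Dict.keys_foldl_insert, PySem.Dict.keys_empty]
  rw [PySem.Set.update_nil_left, PySem.Set.ofList_eq_self_of_nodup K hnd]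

-- ==== B-side lemmas ====

-- B's nested index-building loop is the flat loop over all (term, lemma) pairs
theorem index_nested_eq_flat (L : List (String × List String)) (d : PySem.Dict String (List String)) :
    L.foldl (fun ix p => p.2.foldl (fun ix t => ix.modify t ([] : List String) (· ++ [p.1])) ix) d
      = (L.flatMap (fun r => r.2.map (fun s => (s, r.1)))).foldl
          (fun ix q => ix.modify q.1 ([] : List String) (· ++ [q.2])) d := by
  induction L generalizing d with
  | nil => rfl
  | cons p L ih =>
      simp only [List.foldl_cons, List.flatMap_cons, List.foldl_append, List.foldl_map]
      exact ih _

-- index correctness: a lemma's name is listed under term t iff t is one of its terms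
theorem mem_index_getD (L : List (String × List String)) (hnd : (L.map Prod.fst).Nodup)
    (p : String × List String) (hp : p ∈ L) (t : String) :
    (p.1 ∈ ((L.flatMap (fun r => r.2.map (fun s => (s, r.1)))).foldl
        (fun ix q => ix.modify q.1 ([] : List String) (· ++ [q.2])) PySem.Dict.empty).getD t [])
      ↔ t ∈ p.2 := by
  rw [PySem.Dict.getD_foldl_modify_append]
  simp only [PySem.Dict.getD_empty, List.nil_append, List.mem_map, List.mem_filter,
    List.mem_flatMap, beq_iff_eq]
  constructor
  · rintro ⟨q, ⟨⟨r, hr, s, hs, rfl⟩, hq⟩, hq2⟩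
    have : r = p := fst_inj_of_nodup L hnd hr hp hq2
    subst this
    exact hq ▸ hs
  · intro ht
    exact ⟨(t, p.1), ⟨⟨p, hp, t, ht, rfl⟩, rfl⟩, rfl⟩

-- membership in the matched set built by B's per-document loop
theorem mem_foldl_update (keys : List String) (g : String → List String)
    (m : PySem.Set String) (y : String) :
    (y ∈ keys.foldl (fun m t => PySem.Set.update m (g t)) m) ↔ y ∈ m ∨ ∃ t ∈ keys, y ∈ g t := by
  induction keys generalizing m with
  | nil => simp
  | cons t keys ih =>
      simp only [List.foldl_cons, ih, PySem.Set.mem_update, List.mem_cons]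
      constructor
      · rintro (⟨h | h⟩ | ⟨s, hs, hy⟩)
        · exact Or.inl h
        · exact Or.inr ⟨t, Or.inl rfl, h⟩
        · exact Or.inr ⟨s, Or.inr hs, hy⟩
      · rintro (h | ⟨s, (rfl | hs), hy⟩)
        · exact Or.inl (Or.inl h)
        · exact Or.inl (Or.inr hy)
        · exact Or.inr ⟨s, hs, hy⟩

theorem nodup_foldl_update (keys : List String) (g : String → List String)
    (m : PySem.Set String) (h : m.Nodup) :
    (keys.foldl (fun m t => PySem.Set.update m (g t)) m).Nodup := by
  induction keys generalizing m with
  | nil => exact h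
  | cons t keys ih => exact ih _ (PySem.Set.nodup_update _ _ h)

-- one document step of B, through getD at a fixed key
theorem getD_b_inner (matched : List String) (hnd : matched.Nodup)
    (d : PySem.Dict String Int) (k : String) :
    (matched.foldl (fun d l => d.modify l 0 (· + 1)) d).getD k 0
      = d.getD k 0 + (if k ∈ matched then 1 else 0) := by
  rw [PySem.Dict.getD_foldl_modify_add_one]
  congr 1
  by_cases h : k ∈ matched
  · simp [h, List.count_eq_one_of_mem hnd h]
  · simp [h, List.count_eq_zero.mpr h]

theorem keys_b_inner (matched : List String) (d : PySem.Dict String Int)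
    (hsub : ∀ x ∈ matched, x ∈ d.keys) :
    (matched.foldl (fun d l => d.modify l 0 (· + 1)) d).keys = d.keys := by
  have h1 : matched.foldl (fun d l => d.modify l 0 (· + 1)) d
      = matched.foldl (fun d l => d.modify l 0 ((fun (_ : String) (v : Int) => v + 1) l)) d := rfl
  rw [h1, PySem.Dict.keys_foldl_modify]
  exact set_update_eq_self _ _ hsub

-- B's whole document loop, through getD at a fixed key
theorem getD_doc_loop_b (docs : List (List (String × Int)))
    (M : List (String × Int) → List String) (hnd : ∀ c, (M c).Nodup)
    (d : PySem.Dict String Int) (k : String) :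
    (docs.foldl (fun d c => (M c).foldl (fun d l => d.modify l 0 (· + 1)) d) d).getD k 0
      = d.getD k 0 + (docs.countP (fun c => decide (k ∈ M c)) : Int) := by
  induction docs generalizing d with
  | nil => simp
  | cons c docs ih =>
      simp only [List.foldl_cons, List.countP_cons]
      rw [ih _, getD_b_inner (M c) (hnd c) d k]
      by_cases h : k ∈ M c
      · simp [h]; ring
      · simp [h]

theorem keys_doc_loop_b (docs : List (List (String × Int)))
    (M : List (String × Int) → List String)
    (d : PySem.Dict String Int) (hsub : ∀ c, ∀ x ∈ M c, x ∈ d.keys) :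
    (docs.foldl (fun d c => (M c).foldl (fun d l => d.modify l 0 (· + 1)) d) d).keys = d.keys := by
  induction docs generalizing d with
  | nil => rfl
  | cons c docs ih =>
      simp only [List.foldl_cons]
      rw [ih, keys_b_inner (M c) d (hsub c)]
      intro c' x hx; rw [keys_b_inner (M c) d (hsub c)]; exact hsub c' x hx

-- ===== VERDICT (by name: the statement is the Claim_ definition above) =====
theorem build_lemma_document_frequency_spec : Claim_equal_build_lemma_document_frequency := by
  intro doc_counters lemma_map _
  unfold Spec_build_lemma_document_frequency build_lemma_document_frequency build_lemma_document_frequency_alt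
  simp only []
  set lmD := PySem.Dict.ofList lemma_map with hlmD
  set docs := (PySem.Dict.ofList doc_counters).values with hdocs
  set L := lmD.items with hL
  have hndK : lmD.keys.Nodup := PySem.Dict.nodup_keys_ofList lemma_map
  have hkeys : lmD.keys = L.map Prod.fst := rfl
  have hndL : (L.map Prod.fst).Nodup := hkeys ▸ hndK
  set df0 := lmD.keys.foldl (fun d l => d.insert l (0 : Int)) PySem.Dict.empty with hdf0
  have hdf0keys : df0.keys = L.map Prod.fst := by
    rw [hdf0, keys_df0 lmD.keys hndK]; exact hkeys
  have hdf0getD : ∀ k, df0.getD k 0 = 0 := fun k =>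
    getD_foldl_insert_zero _ _ (fun k' => by simp [PySem.Dict.getD_empty]) k
  -- the inverted index and B's matched-set function
  set index : PySem.Dict String (List String) :=
    L.foldl (fun ix p => p.2.foldl (fun ix t => ix.modify t ([] : List String) (· ++ [p.1])) ix)
      PySem.Dict.empty with hindex
  set M : List (String × Int) → List String := fun c =>
    (PySem.Dict.ofList c).keys.foldl (fun m t => PySem.Set.update m (index.getD t [])) PySem.Set.empty
    with hM
  have hMnd : ∀ c, (M c).Nodup := fun c => nodup_foldl_update _ _ _ List.nodup_nil
  have hidx : ∀ p ∈ L, ∀ t, (p.1 ∈ index.getD t []) ↔ t ∈ p.2 := by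
    intro p hp t
    rw [hindex, index_nested_eq_flat]
    exact mem_index_getD L hndL p hp t
  have hMmem : ∀ c y, y ∈ M c ↔ ∃ t ∈ (PySem.Dict.ofList c).keys, y ∈ index.getD t [] := by
    intro c y
    rw [hM]
    simp only [mem_foldl_update]
    simp [PySem.Set.empty]
  have hMsub : ∀ c, ∀ x ∈ M c, x ∈ df0.keys := by
    intro c x hx
    rcases (hMmem c x).mp hx with ⟨t, _, hxi⟩
    rw [hindex, index_nested_eq_flat, PySem.Dict.getD_foldl_modify_append] at hxi
    simp only [PySem.Dict.getD_empty, List.nil_append, List.mem_map, List.mem_filter,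
      List.mem_flatMap] at hxi
    rcases hxi with ⟨q, ⟨⟨r, hr, s, _, rfl⟩, _⟩, rfl⟩
    rw [hdf0keys]
    exact List.mem_map_of_mem hr
  -- A's per-document condition and B's agree on every item of lemma_map
  have hcond : ∀ p ∈ L, ∀ c,
      (decide (p.1 ∈ M c))
        = p.2.any (fun t => PySem.Set.contains (PySem.Set.ofList (PySem.Dict.ofList c).keys) t) := by
    intro p hp c
    rw [Bool.eq_iff_iff, decide_eq_true_iff, hMmem c p.1, List.any_eq_true]
    constructor
    · rintro ⟨t, htk, hti⟩
      exact ⟨t, (hidx p hp t).mp hti, (PySem.Set.contains_iff _ _).mpr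
        ((PySem.Set.mem_ofList _ _).mpr htk)⟩
    · rintro ⟨t, htp, htc⟩
      exact ⟨t, (PySem.Set.mem_ofList _ _).mp ((PySem.Set.contains_iff _ _).mp htc),
        (hidx p hp t).mpr htp⟩
  -- both final dicts have keys = L.map fst and agree pointwise
  set FA := fun (d : PySem.Dict String Int) (c : List (String × Int)) =>
    L.foldl (fun d p =>
      if p.2.any (fun t => PySem.Set.contains (PySem.Set.ofList (PySem.Dict.ofList c).keys) t)
      then d.modify p.1 0 (· + 1) else d) d with hFA
  set FB := fun (d : PySem.Dict String Int) (c : List (String × Int)) =>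
    (M c).foldl (fun d l => d.modify l 0 (· + 1)) d with hFB
  have hsubA : ∀ r ∈ L, r.1 ∈ df0.keys := by
    intro r hr; rw [hdf0keys]; exact List.mem_map_of_mem hr
  have hkeysA : (docs.foldl FA df0).keys = L.map Prod.fst := by
    rw [hFA, keys_doc_loop docs L df0 hsubA, hdf0keys]
  have hkeysB : (docs.foldl FB df0).keys = L.map Prod.fst := by
    rw [hFB, keys_doc_loop_b docs M df0 hMsub, hdf0keys]
  rw [PySem.Dict.items_eq_map_keys _ (hkeysA ▸ hndL) 0,
      PySem.Dict.items_eq_map_keys _ (hkeysB ▸ hndL) 0, hkeysA, hkeysB,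
      List.map_map, List.map_map]
  apply List.map_congr_left
  intro p hp
  simp only [Function.comp_apply]
  congr 1
  rw [hFA, getD_doc_loop docs L df0 p hp hndL,
      hFB, getD_doc_loop_b docs M hMnd df0 p.1, hdf0getD]
  congr 2
  exact (List.countP_congr (fun c _ => by rw [hcond p hp c])).symm
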